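-- pv_equiv track=rewrite | github.com/Cyb3r3x3r/HackerEarth_solutions | favouritesinger_hackerearth.py | favourite_singer
-- ===== SOURCE A (Python) =====
-- def favourite_singer(arr):
--     count_dict = {}
--
--     for num in arr:
--         if num in count_dict:
--             count_dict[num]+=1
--         else:
--             count_dict[num]=1
--
--     max_song_count = max(count_dict.values())
--
--     fav_singer = [key for key,value in count_dict.items() if value == max_song_count]
--
--     return len(fav_singer)
-- ===== SOURCE B (Python) =====
-- def favourite_singer(arr):
--     # sort-then-scan-runs instead of hash counting; return value identical to A's
--     s = sorted(arr)
--     lens = []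
--     i = 0
--     n = len(s)
--     while i < n:
--         j = i + 1
--         while j < n and s[j] == s[i]:
--             j += 1
--         lens.append(j - i)
--         i = j
--     m = max(lens)  # ValueError on empty input, exactly like A's max over no counts
--     return lens.count(m)
-- ===== Notes on version B (the rewrite author's own statement) =====
-- stated objective: alternative
-- what changed: Replaces A's hash-map counting (dict build, max over values, filter pass) by sorting a copy of the input and scanning consecutive equal runs, then counting how many run lengths attain the maximum run length.
import Mathlib
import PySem

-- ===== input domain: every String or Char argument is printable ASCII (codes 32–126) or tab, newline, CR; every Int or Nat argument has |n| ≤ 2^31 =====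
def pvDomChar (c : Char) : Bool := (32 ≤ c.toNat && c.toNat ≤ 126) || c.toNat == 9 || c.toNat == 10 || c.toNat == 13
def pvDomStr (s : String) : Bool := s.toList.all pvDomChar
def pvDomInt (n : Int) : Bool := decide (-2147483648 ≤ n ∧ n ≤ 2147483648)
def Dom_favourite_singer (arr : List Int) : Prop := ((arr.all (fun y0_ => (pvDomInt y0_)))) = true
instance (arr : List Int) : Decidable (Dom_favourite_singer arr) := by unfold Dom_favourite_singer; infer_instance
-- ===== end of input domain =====

-- B replaces A's dict-based frequency counting by sorting a copy of the input and
-- scanning consecutive equal runs (a different algorithm of similar cost).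

-- ===== PORT A =====
def favourite_singer (arr : List Int) : Int :=
  let count_dict : PySem.Dict Int Int :=
    arr.foldl (fun d num =>
      if d.contains num then d.modify num 0 (· + 1) else d.insert num 1)
      PySem.Dict.empty
  match PySem.List.max? count_dict.values (fun v => v) with
  | none => 0   -- unreachable under Pre_: Python's max raises ValueError on empty arr
  | some max_song_count =>
    let fav_singer := (count_dict.items.filter
        (fun kv => kv.2 == max_song_count)).map (fun kv => kv.1)
    (fav_singer.length : Int)

-- ===== PORT B =====
-- Source B's outer/inner while loops: one run per outer step, j - i = 1 + #following equal elements
def pvRunLens : List Int → List Int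
  | [] => []
  | x :: t =>
    ((t.takeWhile (fun y => y == x)).length + 1 : Int) ::
      pvRunLens (t.dropWhile (fun y => y == x))
  termination_by l => l.length
  decreasing_by
    simp only [List.length_cons]
    exact Nat.lt_succ_of_le (List.length_dropWhile_le _ _)

def favourite_singer_alt (arr : List Int) : Int :=
  let s := PySem.List.sorted arr (fun x => x) false
  let lens := pvRunLens s
  match PySem.List.max? lens (fun v => v) with
  | none => 0   -- unreachable under Pre_: Python's max raises ValueError on empty lens
  | some m => (lens.count m : Int)

-- ===== PRECONDITION & SPEC =====
-- Pre_ excludes only the empty list, on which both Pythons raise ValueError (max of an empty sequence).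
def Pre_favourite_singer (arr : List Int) : Prop := arr ≠ []
instance (arr : List Int) : Decidable (Pre_favourite_singer arr) := by
  unfold Pre_favourite_singer; infer_instance
def pvWitness_favourite_singer : List Int := ([1, 2, 2])

def Spec_favourite_singer (arr : List Int) (out : Int) : Prop := out = favourite_singer_alt arr
instance (arr : List Int) (out : Int) : Decidable (Spec_favourite_singer arr out) := by
  unfold Spec_favourite_singer; infer_instance

-- ===== CLAIM (what is proved, stated in full; the proofs are below) =====
def Claim_equal_favourite_singer : Prop := ∀ (arr : List Int), Dom_favourite_singer arr → Pre_favourite_singer arr → Spec_favourite_singer arr (favourite_singer arr)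

-- ===== LEMMAS AND PROOFS =====

-- A's counting loop is collections.Counter
theorem pvFoldA_eq_counter (arr : List Int) :
    arr.foldl (fun d num =>
      if d.contains num then d.modify num 0 (· + 1) else d.insert num 1)
      PySem.Dict.empty = PySem.Dict.counter arr := by
  have hstep : (fun (d : PySem.Dict Int Int) num =>
      if d.contains num then d.modify num 0 (· + 1) else d.insert num 1)
      = fun d num => d.modify num 0 (· + 1) := by
    funext d x
    by_cases h : d.contains x = true
    · simp [h]
    · have h' : d.contains x = false := by simpa using h
      simp [h', PySem.Dict.modify, PySem.Dict.insert,
        PySem.Dict.getD_of_not_contains (h := h')]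
  rw [hstep, PySem.Dict.counter_eq_foldl]

-- the frequency multiset, presented as: for each first occurrence, its total count
def pvVals (xs : List Int) : List Int :=
  (PySem.List.dedup xs).map (fun k => (xs.count k : Int))

theorem pvDedup_cons (x : Int) (xs : List Int) :
    PySem.List.dedup (x :: xs)
      = x :: (PySem.List.dedup xs).filter (fun y => !(y == x)) := by
  simp only [PySem.List.dedup_eq_ofList, PySem.Set.ofList_eq_foldl, List.foldl_cons]
  rw [show PySem.Set.add [] x = [x] from rfl,
     show (xs.foldl PySem.Set.add [x]) = PySem.Set.update [x] xs from rfl,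
     PySem.Set.update_eq_append_filter]
  simp only [PySem.Set.ofList_eq_foldl, List.cons_append, List.nil_append, List.cons.injEq, true_and]
  exact (List.filter_congr (fun y _ => by simp [PySem.Set.contains]; rfl)).symm

theorem pvDedup_drop (x : Int) (tk rest : List Int) (htk : ∀ y ∈ tk, y = x) :
    (PySem.List.dedup (tk ++ rest)).filter (fun y => !(y == x))
      = (PySem.List.dedup rest).filter (fun y => !(y == x)) := by
  induction tk with
  | nil => rfl
  | cons y tk ih =>
    have hy : y = x := htk y (by simp)
    subst hy
    rw [List.cons_append, pvDedup_cons]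
    simp only [List.filter_cons, beq_self_eq_true, Bool.not_true, List.filter_filter,
      Bool.and_self]
    exact ih (fun z hz => htk z (by simp [hz]))

-- on a (weakly) increasing list the run lengths ARE, run by run, the counts of the
-- distinct elements in first-occurrence order
theorem pvRunLens_sorted (l : List Int) (h : l.Pairwise (· ≤ ·)) :
    pvRunLens l = pvVals l := by
  induction l using pvRunLens.induct with
  | case1 => rw [pvRunLens]; rfl
  | case2 x t ih =>
    have htd := (List.takeWhile_append_dropWhile (p := fun y => y == x) (l := t)).symm
    have htk : ∀ y ∈ t.takeWhile (fun y => y == x), y = x := by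
      intro y hy
      have := List.mem_takeWhile_imp hy
      simpa using this
    have hxt : ∀ y ∈ t, x ≤ y := fun y hy => (List.pairwise_cons.mp h).1 y hy
    have hpt : t.Pairwise (· ≤ ·) := (List.pairwise_cons.mp h).2
    have hrest_sub : (t.dropWhile (fun y => y == x)).Sublist t := List.dropWhile_sublist _
    have hprest : (t.dropWhile (fun y => y == x)).Pairwise (· ≤ ·) := hpt.sublist hrest_sub
    have hgt : ∀ y ∈ t.dropWhile (fun y => y == x), x < y := by
      cases hr : t.dropWhile (fun y => y == x) with
      | nil => intro y hy; simp at hy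
      | cons hd tl =>
        have hhd_ne : ¬ (hd == x) = true := by
          have := List.head?_dropWhile_not (p := fun y => y == x) (l := t)
          rw [hr] at this; simpa using this
        have hhd_mem : hd ∈ t := hrest_sub.mem (by rw [hr]; simp)
        have hxhd : x < hd :=
          lt_of_le_of_ne (hxt hd hhd_mem) (by simpa using fun e => hhd_ne (by simp [e]))
        intro y hy
        rw [hr] at hprest
        rcases List.mem_cons.mp hy with rfl | hy'
        · exact hxhd
        · exact lt_of_lt_of_le hxhd ((List.pairwise_cons.mp hprest).1 y hy')
    have hxnrest : ∀ y ∈ t.dropWhile (fun y => y == x), y ≠ x :=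
      fun y hy => ne_of_gt (hgt y hy)
    have hcount_tk : (t.takeWhile (fun y => y == x)).count x
        = (t.takeWhile (fun y => y == x)).length := by
      rw [List.count_eq_length]
      intro b hb; exact (htk b hb).symm
    have hcount_rest : (t.dropWhile (fun y => y == x)).count x = 0 := by
      rw [List.count_eq_zero]
      intro hmem; exact hxnrest x hmem rfl
    have hcx : (x :: t).count x = (t.takeWhile (fun y => y == x)).length + 1 := by
      conv_lhs => rw [htd]
      rw [show x :: (t.takeWhile (fun y => y == x) ++ t.dropWhile (fun y => y == x))
          = (x :: t.takeWhile (fun y => y == x)) ++ t.dropWhile (fun y => y == x) from rfl]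
      rw [List.count_append, List.count_cons_self, hcount_tk, hcount_rest]
    have hded : PySem.List.dedup (x :: t)
        = x :: PySem.List.dedup (t.dropWhile (fun y => y == x)) := by
      rw [pvDedup_cons]
      conv_lhs => rw [htd]
      rw [pvDedup_drop x _ _ htk]
      congr 1
      apply List.filter_eq_self.mpr
      intro y hy
      have : y ∈ t.dropWhile (fun y => y == x) := (PySem.List.mem_dedup _ _).mp hy
      simpa using hxnrest y this
    have hcrest : ∀ y ∈ PySem.List.dedup (t.dropWhile (fun y => y == x)),
        (x :: t).count y = (t.dropWhile (fun y => y == x)).count y := by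
      intro y hy
      have hymem := (PySem.List.mem_dedup _ _).mp hy
      have hyne : y ≠ x := hxnrest y hymem
      have hytk : y ∉ t.takeWhile (fun y => y == x) := fun hc => hyne (htk y hc)
      conv_lhs => rw [htd]
      rw [show x :: (t.takeWhile (fun y => y == x) ++ t.dropWhile (fun y => y == x))
          = (x :: t.takeWhile (fun y => y == x)) ++ t.dropWhile (fun y => y == x) from rfl]
      rw [List.count_append, List.count_eq_zero.mpr (by simp [hyne, hytk]), Nat.zero_add]
    have h1 : (((t.takeWhile (fun y => y == x)).length : Int) + 1)
        = (((t.takeWhile (fun y => y == x)).length + 1 : Nat) : Int) := by push_cast; ring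
    rw [pvRunLens, ih hprest]
    unfold pvVals
    rw [hded, List.map_cons, hcx, h1]
    congr 1
    exact (List.map_congr_left (fun y hy => by rw [hcrest y hy])).symm

theorem pvVals_perm {xs ys : List Int} (h : xs.Perm ys) :
    (pvVals xs).Perm (pvVals ys) := by
  unfold pvVals
  have h1 : (PySem.List.dedup xs).map (fun k => (xs.count k : Int))
      = (PySem.List.dedup xs).map (fun k => (ys.count k : Int)) :=
    List.map_congr_left (fun y _ => by rw [h.count_eq])
  rw [h1]
  refine List.Perm.map _ ?_
  refine (List.perm_ext_iff_of_nodup (PySem.List.nodup_dedup _)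
    (PySem.List.nodup_dedup _)).mpr ?_
  intro a
  rw [PySem.List.mem_dedup, PySem.List.mem_dedup]
  exact h.mem_iff

theorem pvMax?_perm {xs ys : List Int} (h : xs.Perm ys) :
    PySem.List.max? xs (fun v => v) = PySem.List.max? ys (fun v => v) := by
  cases hx : PySem.List.max? xs (fun v => v) with
  | none =>
    have : xs = [] := (PySem.List.max?_eq_none_iff _ _).mp hx
    subst this
    rw [(PySem.List.max?_eq_none_iff _ _).mpr h.nil_eq.symm]
  | some m =>
    cases hy : PySem.List.max? ys (fun v => v) with
    | none =>
      have : ys = [] := (PySem.List.max?_eq_none_iff _ _).mp hy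
      subst this
      rw [h.eq_nil] at hx
      rw [(PySem.List.max?_eq_none_iff (α := Int) [] (fun v => v)).mpr rfl] at hx
      cases hx
    | some m' =>
      have hm : m ∈ xs := PySem.List.max?_mem hx
      have hm' : m' ∈ ys := PySem.List.max?_mem hy
      have h1 : m ≤ m' := PySem.List.max?_isMax hy m (h.mem_iff.mp hm)
      have h2 : m' ≤ m := PySem.List.max?_isMax hx m' (h.mem_iff.mpr hm')
      rw [le_antisymm h1 h2]

theorem pvA_eq_count (arr : List Int) (m : Int) :
    (((PySem.Dict.counter arr).items.filter (fun kv => kv.2 == m)).map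
      (fun kv => kv.1)).length = (pvVals arr).count m := by
  rw [PySem.Dict.items_counter]
  unfold pvVals
  rw [List.filter_map, List.length_map, List.length_map]
  simp [List.count_eq_countP, List.countP_eq_length_filter, List.filter_map, Function.comp_def]

theorem pvValsA (arr : List Int) : (PySem.Dict.counter arr).values = pvVals arr := by
  have h := PySem.Dict.items_counter (xs := arr)
  unfold pvVals
  simp only [PySem.Dict.values, h, List.map_map, Function.comp_def]
  simp

-- ===== VERDICT (by name: the statement is the Claim_ definition above) =====
theorem favourite_singer_spec : Claim_equal_favourite_singer := by
  intro arr _ hpre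
  unfold Spec_favourite_singer favourite_singer favourite_singer_alt
  simp only [pvFoldA_eq_counter]
  have hperm : (PySem.List.sorted arr (fun x => x) false).Perm arr :=
    PySem.List.sorted_perm arr (fun x => x) false
  have hlens : pvRunLens (PySem.List.sorted arr (fun x => x) false)
      = pvVals (PySem.List.sorted arr (fun x => x) false) :=
    pvRunLens_sorted _ (PySem.List.sorted_pairwise arr (fun x => x))
  have hvperm : (pvVals (PySem.List.sorted arr (fun x => x) false)).Perm (pvVals arr) :=
    pvVals_perm hperm
  have hscrut : PySem.List.max? (pvRunLens (PySem.List.sorted arr (fun x => x) false)) (fun v => v)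
      = PySem.List.max? ((PySem.Dict.counter arr).values) (fun v => v) := by
    rw [hlens, pvValsA]
    exact pvMax?_perm hvperm
  rw [hscrut]
  cases hm : PySem.List.max? ((PySem.Dict.counter arr).values) (fun v => v) with
  | none => rfl
  | some m =>
    have hc : (pvVals (PySem.List.sorted arr (fun x => x) false)).count m
        = (pvVals arr).count m := hvperm.count_eq m
    dsimp only
    rw [hlens, hc, ← pvA_eq_count arr m]
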